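-- pv_equiv track=rewrite | github.com/Kir4kami/flow-input | Traffic Generation/paralle_mode/alltoall.py | get_host_list
-- ===== SOURCE A (Python) =====
-- def get_host_list(host_num, dp):
--     assert host_num % dp == 0
--     span = host_num // dp
--     host_list = []
--     for start in range(span):
--         host_ids = []
--         for host_id in range(start, host_num, span):
--             host_ids.append(host_id)
--         host_list.append(host_ids)
--     return host_list
-- ===== SOURCE B (Python) =====
-- def get_host_list(host_num, dp):
--     assert host_num % dp == 0
--     span = host_num // dp
--     rows = [list(range(i * span, (i + 1) * span)) for i in range(dp)] if span > 0 else []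
--     return [list(col) for col in zip(*rows)]
-- ===== Notes on version B (the rewrite author's own statement) =====
-- stated objective: alternative
-- what changed: B builds the dp contiguous chunks [i*span,(i+1)*span) and transposes them with zip(*rows), instead of A's nested loop that gathers each stride group with range(start, host_num, span).
-- intended difference: On host_num < 0 with dp < 0 A returns host_num//dp phantom empty groups (e.g. [[]] at (-2,-2)) while B returns []; a negative host count means no hosts, so B's empty grouping is the intended value. — e.g. on get_host_list(-2, -2): A returns [[]], B returns []
import Mathlib
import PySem

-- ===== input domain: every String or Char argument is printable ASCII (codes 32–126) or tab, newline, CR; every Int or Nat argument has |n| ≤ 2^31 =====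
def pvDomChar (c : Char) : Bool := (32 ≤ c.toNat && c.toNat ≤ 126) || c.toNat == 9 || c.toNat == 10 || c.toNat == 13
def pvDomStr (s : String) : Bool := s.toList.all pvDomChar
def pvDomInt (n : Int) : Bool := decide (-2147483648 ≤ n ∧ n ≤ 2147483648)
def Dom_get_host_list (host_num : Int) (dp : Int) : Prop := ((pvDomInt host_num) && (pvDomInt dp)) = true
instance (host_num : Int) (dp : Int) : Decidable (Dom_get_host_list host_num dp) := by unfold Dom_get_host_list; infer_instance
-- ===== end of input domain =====

-- B builds the dp × span chunks [i*span, …, (i+1)*span-1] and transposes them with zip(*rows)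
-- instead of gathering each stride group with a nested loop (objective: alternative, same cost).

-- ===== PORT A =====
-- 'assert host_num % dp == 0' and '//' raise outside Pre_; the port computes the normal-return path.
def get_host_list (host_num : Int) (dp : Int) : List (List Int) :=
  let span := PySem.Int.floordiv host_num dp
  (PySem.List.pyRange 0 span 1).foldl
    (fun host_list start =>
      host_list ++ [(PySem.List.pyRange start host_num span).foldl
        (fun host_ids host_id => host_ids ++ [host_id]) []]) []

-- ===== PORT B =====
-- zip(*rows) yields one tuple per step until some row is exhausted; the number of steps is
-- bounded by the first row's length, used here as structural fuel (exact: zip's output is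
-- never longer than its first argument), and zip() with no rows yields nothing.
def pvZipGo : Nat → List (List Int) → List (List Int)
  | 0, _ => []
  | n + 1, rows =>
    if rows.any (·.isEmpty) then []
    else (rows.map (fun r => r.headD 0)) :: pvZipGo n (rows.map (·.tail))

def pvZip : List (List Int) → List (List Int)
  | [] => []
  | r :: rs => pvZipGo r.length (r :: rs)

def get_host_list_alt (host_num : Int) (dp : Int) : List (List Int) :=
  let span := PySem.Int.floordiv host_num dp
  let rows := if 0 < span then
      (PySem.List.pyRange 0 dp 1).map
        (fun i => PySem.List.pyRange (i * span) ((i + 1) * span) 1)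
    else []
  pvZip rows

-- ===== PRECONDITION & SPEC =====
-- Pre_ excludes dp = 0 (A raises ZeroDivisionError) and host_num % dp ≠ 0 (A raises AssertionError).
def Pre_get_host_list (host_num : Int) (dp : Int) : Prop :=
  dp ≠ 0 ∧ PySem.Int.mod host_num dp = 0
instance (host_num : Int) (dp : Int) : Decidable (Pre_get_host_list host_num dp) := by
  unfold Pre_get_host_list; infer_instance
def pvWitness_get_host_list : Int × Int := (6, 2)

-- On host_num < 0 with dp < 0 (a degenerate negative host count), A returns host_num//dp phantom
-- empty groups while B returns []; there are no hosts there, so B's empty grouping is the intended value.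
def D_get_host_list (host_num : Int) (dp : Int) : Prop := host_num < 0 ∧ dp < 0
instance (host_num : Int) (dp : Int) : Decidable (D_get_host_list host_num dp) := by
  unfold D_get_host_list; infer_instance
def Spec_get_host_list (host_num : Int) (dp : Int) (out : List (List Int)) : Prop :=
  ¬ D_get_host_list host_num dp → out = get_host_list_alt host_num dp
instance (host_num : Int) (dp : Int) (out : List (List Int)) : Decidable (Spec_get_host_list host_num dp out) := by unfold Spec_get_host_list; infer_instance
def pvDiffWitness_get_host_list : Int × Int := (-2, -2)
def pvDiffWitnessOut_get_host_list : (List (List Int)) × (List (List Int)) := ([[]], [])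

-- ===== CLAIM (what is proved, stated in full; the proofs are below) =====
def Claim_unchanged_get_host_list : Prop := ∀ (host_num : Int) (dp : Int), Dom_get_host_list host_num dp → Pre_get_host_list host_num dp → Spec_get_host_list host_num dp (get_host_list host_num dp)
def Claim_changed_get_host_list : Prop := Dom_get_host_list (pvDiffWitness_get_host_list.1) (pvDiffWitness_get_host_list.2) ∧ Pre_get_host_list (pvDiffWitness_get_host_list.1) (pvDiffWitness_get_host_list.2) ∧ D_get_host_list (pvDiffWitness_get_host_list.1) (pvDiffWitness_get_host_list.2) ∧ get_host_list (pvDiffWitness_get_host_list.1) (pvDiffWitness_get_host_list.2) = pvDiffWitnessOut_get_host_list.1 ∧ get_host_list_alt (pvDiffWitness_get_host_list.1) (pvDiffWitness_get_host_list.2) = pvDiffWitnessOut_get_host_list.2 ∧ pvDiffWitnessOut_get_host_list.1 ≠ pvDiffWitnessOut_get_host_list.2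
def Claim_exact_get_host_list : Prop := ∀ (host_num : Int) (dp : Int), Dom_get_host_list host_num dp → Pre_get_host_list host_num dp → D_get_host_list host_num dp → get_host_list host_num dp ≠ get_host_list_alt host_num dp

-- ===== LEMMAS AND PROOFS =====

-- A's nested loops compute the list of stride groups.
theorem pvA_eq (host_num dp : Int) :
    get_host_list host_num dp
      = (PySem.List.pyRange 0 (PySem.Int.floordiv host_num dp) 1).map
          (fun s => PySem.List.pyRange s host_num (PySem.Int.floordiv host_num dp)) := by
  simp only [get_host_list]
  rw [show (fun (host_list : List (List Int)) (start : Int) =>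
      host_list ++ [(PySem.List.pyRange start host_num (PySem.Int.floordiv host_num dp)).foldl
        (fun host_ids host_id => host_ids ++ [host_id]) []])
    = (fun (host_list : List (List Int)) (start : Int) =>
      host_list ++ [PySem.List.pyRange start host_num (PySem.Int.floordiv host_num dp)]) from by
      funext hl s; rw [PySem.List.foldl_append_singleton]; simp]
  exact PySem.List.foldl_append_singleton_eq_map _ _ []

-- When every row has at least n elements, the fuelled zip produces the n columns.
theorem pvZipGo_full : ∀ (n : Nat) (rows : List (List Int)),
    (∀ r ∈ rows, n ≤ r.length) →
    pvZipGo n rows = (List.range n).map (fun j => rows.map (fun r => r.getD j 0)) := by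
  intro n
  induction n with
  | zero => intro rows _; simp [pvZipGo]
  | succ n ih =>
    intro rows hlen
    have hne : rows.any (·.isEmpty) = false := by
      simp only [List.any_eq_false]
      intro r hr
      have := hlen r hr
      simp only [List.isEmpty_iff]
      intro h; subst h; simp at this
    rw [pvZipGo, hne]
    simp only [Bool.false_eq_true, if_false]
    rw [ih (rows.map (·.tail)) (by
      intro r hr
      obtain ⟨r', hr', rfl⟩ := List.mem_map.mp hr
      have := hlen r' hr'
      simp [List.length_tail]; omega)]
    rw [List.range_succ_eq_map]
    simp only [List.map_cons, List.map_map]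
    congr 1
    · apply List.map_congr_left
      intro r hr
      have h1 : 1 ≤ r.length := le_trans (by omega) (hlen r hr)
      cases r with
      | nil => simp at h1
      | cons a t => simp
    · apply List.map_congr_left
      intro j _
      simp only [Function.comp]
      apply List.map_congr_left
      intro r hr
      have h1 : 1 ≤ r.length := le_trans (by omega) (hlen r hr)
      cases r with
      | nil => simp at h1
      | cons a t => simp

-- range(j, dp*span, span) = [i*span + j for i in range(dp)]  (0 ≤ j < span, 0 < span, 0 < dp)
theorem pv_col_eq (span dp : Int) (hs : 0 < span) (_hdp : 0 < dp) (j : Int)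
    (hj0 : 0 ≤ j) (hjs : j < span) :
    PySem.List.pyRange j (dp * span) span
      = (PySem.List.pyRange 0 dp 1).map (fun i => i * span + j) := by
  have hmem : ∀ x : Int,
      x ∈ PySem.List.pyRange j (dp * span) span
        ↔ x ∈ (PySem.List.pyRange 0 dp 1).map (fun i => i * span + j) := by
    intro x
    rw [PySem.List.mem_pyRange_iff_of_pos hs, List.mem_map]
    constructor
    · rintro ⟨hjx, hxm, ⟨k, hk⟩⟩
      refine ⟨k, ?_, by rw [mul_comm k span]; omega⟩
      rw [PySem.List.mem_pyRange_one]
      have hk0 : 0 ≤ k := by nlinarith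
      have hkdp : k < dp := by nlinarith
      exact ⟨hk0, hkdp⟩
    · rintro ⟨i, hi, rfl⟩
      rw [PySem.List.mem_pyRange_one] at hi
      refine ⟨by nlinarith, by nlinarith, ⟨i, by ring⟩⟩
  have hpw1 : (PySem.List.pyRange j (dp * span) span).Pairwise (· < ·) := by
    rw [PySem.List.pyRange_of_pos _ _ hs]
    refine List.Pairwise.map _ ?_ List.pairwise_lt_range
    intro a b hab
    have : span * (a : Int) < span * (b : Int) :=
      mul_lt_mul_of_pos_left (by exact_mod_cast hab) hs
    omega
  have hpw2 : ((PySem.List.pyRange 0 dp 1).map (fun i => i * span + j)).Pairwise (· < ·) := by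
    refine List.Pairwise.map _ ?_ (PySem.List.pairwise_lt_pyRange_one 0 dp)
    intro a b hab
    nlinarith
  have hperm := (List.perm_ext_iff_of_nodup hpw1.nodup hpw2.nodup).mpr hmem
  exact hperm.eq_of_pairwise (fun a b _ _ hab hba => absurd hba (not_lt.mpr hab.le)) hpw1 hpw2

-- ===== VERDICT (by name: the statement is the Claim_ definition above) =====
theorem get_host_list_spec : Claim_unchanged_get_host_list := by
  intro host_num dp _ hpre
  obtain ⟨hdp, hmod⟩ := hpre
  unfold Spec_get_host_list
  intro hnD
  unfold D_get_host_list at hnD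
  set span := PySem.Int.floordiv host_num dp with hspan_def
  have hexact : span * dp = host_num := by
    have := PySem.Int.floordiv_mul_add_mod host_num dp
    rw [← hspan_def, hmod] at this; omega
  rw [pvA_eq, ← hspan_def]
  simp only [get_host_list_alt]
  rw [← hspan_def]
  rcases lt_trichotomy dp 0 with hdpneg | hdp0 | hdppos
  · -- dp < 0: D_ rules out host_num < 0, so span ≤ 0 and both sides are []
    have hhn : 0 ≤ host_num := by
      by_contra hc; exact hnD ⟨by omega, hdpneg⟩
    have hsle : span ≤ 0 := by nlinarith
    rw [PySem.List.pyRange_one_eq_nil hsle, if_neg (by omega : ¬ (0:Int) < span)]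
    simp [pvZip]
  · exact absurd hdp0 hdp
  · -- dp > 0
    by_cases hspos : 0 < span
    case neg =>
      -- span ≤ 0: A is [], and B builds no chunks
      have hsle : span ≤ 0 := by omega
      rw [PySem.List.pyRange_one_eq_nil hsle, if_neg (by omega : ¬ (0:Int) < span)]
      simp [pvZip]
    case pos =>
      -- main case: span > 0, dp > 0
      rw [if_pos hspos]
      have hrows_ne : PySem.List.pyRange 0 dp 1 = 0 :: PySem.List.pyRange 1 dp 1 :=
        PySem.List.pyRange_one_cons hdppos
      set f : Int → List Int := fun i => PySem.List.pyRange (i * span) ((i + 1) * span) 1 with hf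
      have hlenf : ∀ i : Int, (f i).length = span.toNat := by
        intro i
        rw [hf]
        simp only [PySem.List.length_pyRange_one]
        congr 1; ring_nf
      have hzip : pvZip ((PySem.List.pyRange 0 dp 1).map f)
          = pvZipGo span.toNat ((PySem.List.pyRange 0 dp 1).map f) := by
        rw [hrows_ne, List.map_cons, pvZip, hlenf]
      rw [hzip, pvZipGo_full span.toNat _ (by
        intro r hr
        obtain ⟨i, _, rfl⟩ := List.mem_map.mp hr
        rw [hlenf])]
      -- both sides are maps over the span column indices
      rw [PySem.List.pyRange_one (0 : Int) span]
      simp only [Int.sub_zero, List.map_map]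
      apply List.map_congr_left
      intro k hk
      rw [List.mem_range] at hk
      have hkInt : (0:Int) ≤ (k:Int) ∧ (k:Int) < span := by
        constructor
        · exact_mod_cast Nat.zero_le k
        · omega
      simp only [Function.comp, zero_add]
      have hcol : PySem.List.pyRange (k : Int) host_num span
          = (PySem.List.pyRange 0 dp 1).map (fun i => i * span + (k : Int)) := by
        rw [show host_num = dp * span by nlinarith]
        exact pv_col_eq span dp hspos hdppos _ hkInt.1 hkInt.2
      rw [hcol]
      apply List.map_congr_left
      intro i hi
      rw [PySem.List.mem_pyRange_one] at hi
      simp only [Function.comp, hf]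
      rw [List.getD_eq_getElem _ _ (by
        rw [PySem.List.length_pyRange_one]
        have : ((i+1) * span - i * span) = span := by ring
        rw [this]; omega)]
      rw [PySem.List.getElem_pyRange_one]

theorem get_host_list_changed : Claim_changed_get_host_list := by
  unfold Claim_changed_get_host_list; decide

theorem get_host_list_tight : Claim_exact_get_host_list := by
  intro host_num dp _ hpre hD
  obtain ⟨hdp, hmod⟩ := hpre
  obtain ⟨hhn, hdpneg⟩ := hD
  set span := PySem.Int.floordiv host_num dp with hspan_def
  have hexact : span * dp = host_num := by
    have := PySem.Int.floordiv_mul_add_mod host_num dp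
    rw [← hspan_def, hmod] at this; omega
  have hspos : 0 < span := by nlinarith
  intro heq
  -- B is [] (no rows), A has span ≥ 1 groups
  have hB : get_host_list_alt host_num dp = [] := by
    simp only [get_host_list_alt]
    rw [← hspan_def, if_pos hspos, PySem.List.pyRange_one_eq_nil (by omega : dp ≤ (0:Int))]
    simp [pvZip]
  have hA : (get_host_list host_num dp).length = span.toNat := by
    rw [pvA_eq, ← hspan_def, List.length_map, PySem.List.length_pyRange_one]
    congr 1; omega
  rw [heq, hB] at hA
  simp at hA
  omega
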